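-- pv_equiv track=rewrite | github.com/KimGJHC/Data-Structure-Algorithem-learning | QueueQ/maxNumberOfPeopleThatCanBeCaughtInTag.py | catchMaximumAmountofPeople
-- ===== SOURCE A (Python) =====
-- from typing import List
--
-- from collections import deque
--
-- def catchMaximumAmountofPeople(team: List[int], dist: int) -> int:
--     zero_queue = deque()  # store index of 0
--     one_queue = deque()
--     res = 0
--
--     for i, ppl in enumerate(team):
--         if ppl == 0:
--             if one_queue:
--                 while one_queue:
--                     if one_queue[0] >= i - dist:
--                         break
--                     one_queue.popleft()
--                 if one_queue:
--                     res += 1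
--                     one_queue.popleft()
--                 else:
--                     zero_queue.append(i)
--             else:
--                 zero_queue.append(i)
--         else:
--             if zero_queue:
--                 while zero_queue:
--                     if zero_queue[0] >= i - dist:
--                         break
--                     zero_queue.popleft()
--                 if zero_queue:
--                     res += 1
--                     zero_queue.popleft()
--                 else:
--                     one_queue.append(i)
--             else:
--                 one_queue.append(i)
--     return res
-- ===== SOURCE B (Python) =====
-- from typing import List
--
-- def catchMaximumAmountofPeople(team: List[int], dist: int) -> int:
--     zeros = [i for i, p in enumerate(team) if p == 0]
--     ones = [i for i, p in enumerate(team) if p != 0]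
--     zi = oi = res = 0
--     while zi < len(zeros) and oi < len(ones):
--         if abs(zeros[zi] - ones[oi]) <= dist:
--             res += 1
--             zi += 1
--             oi += 1
--         elif zeros[zi] < ones[oi]:
--             zi += 1
--         else:
--             oi += 1
--     return res
-- ===== Notes on version B (the rewrite author's own statement) =====
-- stated objective: alternative
-- what changed: Replaces A's online pass with two lazily-evicted deques by precomputing the sorted index lists of zeros and ones and running a two-pointer greedy merge over them.
import Mathlib
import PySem

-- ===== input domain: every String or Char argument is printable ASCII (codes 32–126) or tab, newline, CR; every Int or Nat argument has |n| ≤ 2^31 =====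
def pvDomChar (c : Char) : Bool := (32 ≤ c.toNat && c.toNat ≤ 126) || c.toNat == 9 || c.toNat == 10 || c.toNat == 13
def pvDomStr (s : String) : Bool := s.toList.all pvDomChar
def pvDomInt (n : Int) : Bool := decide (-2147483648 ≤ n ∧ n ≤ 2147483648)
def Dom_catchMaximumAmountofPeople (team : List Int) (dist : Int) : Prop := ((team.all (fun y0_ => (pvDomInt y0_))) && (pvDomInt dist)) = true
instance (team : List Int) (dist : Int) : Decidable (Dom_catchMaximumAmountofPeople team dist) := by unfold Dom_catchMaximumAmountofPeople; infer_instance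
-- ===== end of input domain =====

-- B precomputes the index lists and counts matches by a two-pointer merge; same O(n) cost, different structure.

-- ===== PORT A =====
-- the inner `while one_queue/zero_queue` stale-eviction loop of A
def pvEvict (dist i : Int) : List Int → List Int
  | [] => []
  | x :: xs => if x ≥ i - dist then x :: xs else pvEvict dist i xs

-- A's `for i, ppl in enumerate(team)` loop over state (zero_queue, one_queue, res)
def pvALoop (dist : Int) : List Int → Int → List Int × List Int × Int → List Int × List Int × Int
  | [], _, st => st
  | ppl :: rest, i, (zq, oq, res) =>
    pvALoop dist rest (i + 1)
      (if ppl = 0 then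
        if oq ≠ [] then
          let oq' := pvEvict dist i oq
          if oq' ≠ [] then (zq, oq'.tail, res + 1) else (zq ++ [i], oq', res)
        else (zq ++ [i], oq, res)
      else
        if zq ≠ [] then
          let zq' := pvEvict dist i zq
          if zq' ≠ [] then (zq'.tail, oq, res + 1) else (zq', oq ++ [i], res)
        else (zq, oq ++ [i], res))

def catchMaximumAmountofPeople (team : List Int) (dist : Int) : Int :=
  (pvALoop dist team 0 ([], [], 0)).2.2

-- ===== PORT B =====
-- `[i for i, p in enumerate(team) if pred(p)]`
def pvSelIdx (p : Int → Bool) : List Int → Int → List Int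
  | [], _ => []
  | x :: xs, i => if p x then i :: pvSelIdx p xs (i + 1) else pvSelIdx p xs (i + 1)

-- B's two-pointer while loop (advancing a pointer = taking the tail)
def pvMerge (dist : Int) : List Int → List Int → Int
  | z :: zs, o :: os =>
    if |z - o| ≤ dist then 1 + pvMerge dist zs os
    else if z < o then pvMerge dist zs (o :: os)
    else pvMerge dist (z :: zs) os
  | _, _ => 0
termination_by zs os => zs.length + os.length

def catchMaximumAmountofPeople_alt (team : List Int) (dist : Int) : Int :=
  pvMerge dist (pvSelIdx (fun p => p == 0) team 0) (pvSelIdx (fun p => p != 0) team 0)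

-- ===== PRECONDITION & SPEC =====
def Spec_catchMaximumAmountofPeople (team : List Int) (dist : Int) (out : Int) : Prop := out = catchMaximumAmountofPeople_alt team dist
instance (team : List Int) (dist : Int) (out : Int) : Decidable (Spec_catchMaximumAmountofPeople team dist out) := by unfold Spec_catchMaximumAmountofPeople; infer_instance

-- ===== CLAIM (what is proved, stated in full; the proofs are below) =====
def Claim_equal_catchMaximumAmountofPeople : Prop := ∀ (team : List Int) (dist : Int), Dom_catchMaximumAmountofPeople team dist → Spec_catchMaximumAmountofPeople team dist (catchMaximumAmountofPeople team dist)

-- ===== LEMMAS AND PROOFS =====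

theorem pvMerge_nil_right (dist : Int) (zs : List Int) : pvMerge dist zs [] = 0 := by
  cases zs <;> simp [pvMerge]

theorem pvMerge_nil_left (dist : Int) (os : List Int) : pvMerge dist [] os = 0 := by
  cases os <;> simp [pvMerge]

theorem pvEvict_sub {dist i : Int} {q : List Int} {x : Int} (hx : x ∈ pvEvict dist i q) : x ∈ q := by
  induction q with
  | nil => simp [pvEvict] at hx
  | cons a t ih =>
    by_cases h : a ≥ i - dist
    · simpa [pvEvict, h] using hx
    · simp only [pvEvict, if_neg h] at hx
      exact List.mem_cons_of_mem _ (ih hx)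

-- evicting dead heads on the right does not change the merge count
theorem pvMerge_evict_right (dist i : Int) (Z O : List Int) (oq : List Int)
    (h : ∀ x ∈ oq, x < i) :
    pvMerge dist (i :: Z) (oq ++ O) = pvMerge dist (i :: Z) (pvEvict dist i oq ++ O) := by
  induction oq with
  | nil => rfl
  | cons o t ih =>
    by_cases ho : o ≥ i - dist
    · simp [pvEvict, ho]
    · have hlt : o < i := h o (List.mem_cons_self ..)
      have habs : |i - o| = i - o := abs_of_pos (by omega)
      have h1 : ¬ (|i - o| ≤ dist) := by omega
      have h2 : ¬ (i < o) := by omega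
      rw [pvEvict, if_neg ho, List.cons_append, pvMerge, if_neg h1, if_neg h2]
      exact ih (fun x hx => h x (List.mem_cons_of_mem _ hx))

-- evicting dead heads on the left does not change the merge count
theorem pvMerge_evict_left (dist i : Int) (Z O : List Int) (zq : List Int)
    (h : ∀ x ∈ zq, x < i) :
    pvMerge dist (zq ++ Z) (i :: O) = pvMerge dist (pvEvict dist i zq ++ Z) (i :: O) := by
  induction zq with
  | nil => rfl
  | cons z t ih =>
    by_cases hz : z ≥ i - dist
    · simp [pvEvict, hz]
    · have hlt : z < i := h z (List.mem_cons_self ..)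
      have habs : |z - i| = -(z - i) := abs_of_neg (by omega)
      have h1 : ¬ (|z - i| ≤ dist) := by omega
      rw [pvEvict, if_neg hz, List.cons_append, pvMerge, if_neg h1, if_pos hlt]
      exact ih (fun x hx => h x (List.mem_cons_of_mem _ hx))

theorem pvEvict_head_live (dist i o : Int) (t : List Int) :
    ∀ q : List Int, pvEvict dist i q = o :: t → o ≥ i - dist := by
  intro q
  induction q with
  | nil => intro h; simp [pvEvict] at h
  | cons a s ih =>
    intro h
    by_cases ha : a ≥ i - dist
    · rw [pvEvict, if_pos ha] at h; cases h; exact ha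
    · rw [pvEvict, if_neg ha] at h; exact ih h

-- the simulation invariant: A's loop result = accumulated res + merge of the
-- (queue ++ remaining indices) lists, as long as at most one queue is nonempty
-- and all queued indices precede the current index
theorem pvALoop_inv (dist : Int) (rest : List Int) :
    ∀ (i : Int) (zq oq : List Int) (res : Int),
      (zq = [] ∨ oq = []) →
      (∀ x ∈ zq, x < i) → (∀ x ∈ oq, x < i) →
      (pvALoop dist rest i (zq, oq, res)).2.2 =
        res + pvMerge dist (zq ++ pvSelIdx (fun p => p == 0) rest i)
                           (oq ++ pvSelIdx (fun p => p != 0) rest i) := by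
  induction rest with
  | nil =>
    intro i zq oq res hdisj _ _
    rcases hdisj with h | h <;> subst h <;>
      simp [pvALoop, pvSelIdx, pvMerge_nil_left, pvMerge_nil_right]
  | cons ppl rest ih =>
    intro i zq oq res hdisj hzlt holt
    by_cases hp : ppl = 0
    · -- ppl == 0 : current index i is the head of the zeros list
      have hz : pvSelIdx (fun p => p == 0) (ppl :: rest) i
          = i :: pvSelIdx (fun p => p == 0) rest (i + 1) := by simp [pvSelIdx, hp]
      have ho : pvSelIdx (fun p => p != 0) (ppl :: rest) i
          = pvSelIdx (fun p => p != 0) rest (i + 1) := by simp [pvSelIdx, hp]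
      by_cases hoq : oq = []
      · -- no catcher waiting: the person at i joins zero_queue
        subst hoq
        have hstep : pvALoop dist (ppl :: rest) i (zq, [], res)
            = pvALoop dist rest (i + 1) (zq ++ [i], [], res) := by
          simp [pvALoop, hp]
        rw [hstep, ih (i + 1) (zq ++ [i]) [] res (Or.inr rfl)
              (by intro x hx; rcases List.mem_append.1 hx with h | h
                  · exact lt_trans (hzlt x h) (by omega)
                  · simp at h; omega)
              (by intro x hx; simp at hx)]
        rw [hz, ho]; simp [List.append_assoc]
      · -- a catcher is queued: evict stale ones, then match or queue
        have hzq : zq = [] := by rcases hdisj with h | h; exacts [h, absurd h hoq]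
        subst hzq
        have hev := pvMerge_evict_right dist i (pvSelIdx (fun p => p == 0) rest (i + 1))
          (pvSelIdx (fun p => p != 0) rest (i + 1)) oq holt
        rcases hq : pvEvict dist i oq with _ | ⟨o, t⟩
        · -- all queued catchers stale: i joins zero_queue
          have hstep : pvALoop dist (ppl :: rest) i ([], oq, res)
              = pvALoop dist rest (i + 1) ([i], [], res) := by
            simp [pvALoop, hp, hoq, hq]
          rw [hstep, ih (i + 1) [i] [] res (Or.inr rfl)
                (by intro x hx; simp at hx; omega)
                (by intro x hx; simp at hx)]
          rw [hz, ho]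
          simp only [List.nil_append] at hev ⊢
          rw [hev, hq]
          simp
        · -- a live catcher o: they match
          have hstep : pvALoop dist (ppl :: rest) i ([], oq, res)
              = pvALoop dist rest (i + 1) ([], t, res + 1) := by
            simp [pvALoop, hp, hoq, hq]
          have hoi : o < i := holt o (pvEvict_sub (by rw [hq]; exact List.mem_cons_self ..))
          have holive : o ≥ i - dist := pvEvict_head_live dist i o t oq hq
          have habs : |i - o| = i - o := abs_of_pos (by omega)
          rw [hstep, ih (i + 1) [] t (res + 1) (Or.inl rfl)
                (by intro x hx; simp at hx)
                (by intro x hx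
                    have : x ∈ oq := pvEvict_sub (by rw [hq]; exact List.mem_cons_of_mem _ hx)
                    exact lt_trans (holt x this) (by omega))]
          rw [hz, ho]
          simp only [List.nil_append] at hev ⊢
          rw [hev, hq, List.cons_append, pvMerge, if_pos (by omega)]
          ring
    · -- ppl != 0 : current index i is the head of the ones list
      have hz : pvSelIdx (fun p => p == 0) (ppl :: rest) i
          = pvSelIdx (fun p => p == 0) rest (i + 1) := by simp [pvSelIdx, hp]
      have ho : pvSelIdx (fun p => p != 0) (ppl :: rest) i
          = i :: pvSelIdx (fun p => p != 0) rest (i + 1) := by simp [pvSelIdx, hp]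
      by_cases hzq : zq = []
      · -- nobody to catch: the catcher at i joins one_queue
        subst hzq
        have hstep : pvALoop dist (ppl :: rest) i ([], oq, res)
            = pvALoop dist rest (i + 1) ([], oq ++ [i], res) := by
          simp [pvALoop, hp]
        rw [hstep, ih (i + 1) [] (oq ++ [i]) res (Or.inl rfl)
              (by intro x hx; simp at hx)
              (by intro x hx; rcases List.mem_append.1 hx with h | h
                  · exact lt_trans (holt x h) (by omega)
                  · simp at h; omega)]
        rw [hz, ho]; simp [List.append_assoc]
      · -- people are queued: evict stale ones, then match or queue
        have hoq : oq = [] := by rcases hdisj with h | h; exacts [absurd h hzq, h]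
        subst hoq
        have hev := pvMerge_evict_left dist i (pvSelIdx (fun p => p == 0) rest (i + 1))
          (pvSelIdx (fun p => p != 0) rest (i + 1)) zq hzlt
        rcases hq : pvEvict dist i zq with _ | ⟨z, t⟩
        · -- all queued people stale: i joins one_queue
          have hstep : pvALoop dist (ppl :: rest) i (zq, [], res)
              = pvALoop dist rest (i + 1) ([], [i], res) := by
            simp [pvALoop, hp, hzq, hq]
          rw [hstep, ih (i + 1) [] [i] res (Or.inl rfl)
                (by intro x hx; simp at hx)
                (by intro x hx; simp at hx; omega)]
          rw [hz, ho]
          simp only [List.nil_append] at hev ⊢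
          rw [hev, hq]
          simp
        · -- a live person z: they are caught
          have hstep : pvALoop dist (ppl :: rest) i (zq, [], res)
              = pvALoop dist rest (i + 1) (t, [], res + 1) := by
            simp [pvALoop, hp, hzq, hq]
          have hzi : z < i := hzlt z (pvEvict_sub (by rw [hq]; exact List.mem_cons_self ..))
          have hzlive : z ≥ i - dist := pvEvict_head_live dist i z t zq hq
          have habs : |z - i| = -(z - i) := abs_of_neg (by omega)
          rw [hstep, ih (i + 1) t [] (res + 1) (Or.inr rfl)
                (by intro x hx
                    have : x ∈ zq := pvEvict_sub (by rw [hq]; exact List.mem_cons_of_mem _ hx)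
                    exact lt_trans (hzlt x this) (by omega))
                (by intro x hx; simp at hx)]
          rw [hz, ho]
          simp only [List.nil_append] at hev ⊢
          rw [hev, hq, List.cons_append, pvMerge, if_pos (by omega)]
          ring

-- ===== VERDICT (by name: the statement is the Claim_ definition above) =====
theorem catchMaximumAmountofPeople_spec : Claim_equal_catchMaximumAmountofPeople := by
  intro team dist _
  unfold Spec_catchMaximumAmountofPeople catchMaximumAmountofPeople catchMaximumAmountofPeople_alt
  rw [pvALoop_inv dist team 0 [] [] 0 (Or.inl rfl) (by intro x hx; simp at hx)
        (by intro x hx; simp at hx)]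
  simp
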